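-- pv_equiv track=rewrite | github.com/MohammedEssam011/Sliding-Window-Algorithm | COUNT NEGATIVE ELEMENTS PRESENT IN EVERY K-LENGTH SUBARRAY.py | getCountNegatives
-- ===== SOURCE A (Python) =====
-- def getCountNegatives(arr, k):
--     lst = []
--     start = 0
--     count = 0
--
--     for i in range(len(arr)):
--         if arr[i] < 0:
--             count += 1
--
--         if (i - start + 1 == k):
--             lst.append(count)
--             if arr[start] < 0:
--                 count -= 1
--
--             start += 1
--
--     return lst
-- ===== SOURCE B (Python) =====
-- def getCountNegatives(arr, k):
--     n = len(arr)
--     if k < 1 or k > n: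
--         return []
--     pre = [0]
--     for x in arr:
--         pre.append(pre[-1] + (1 if x < 0 else 0))
--     return [pre[s + k] - pre[s] for s in range(n - k + 1)]
-- ===== Notes on version B (the rewrite author's own statement) =====
-- stated objective: alternative
-- what changed: Replaces the one-pass sliding window with a running count (add on entry, subtract on exit) by a prefix-count table built once and random-access differencing pre[s+k]-pre[s] per window, with an explicit k-range guard.
import Mathlib
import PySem

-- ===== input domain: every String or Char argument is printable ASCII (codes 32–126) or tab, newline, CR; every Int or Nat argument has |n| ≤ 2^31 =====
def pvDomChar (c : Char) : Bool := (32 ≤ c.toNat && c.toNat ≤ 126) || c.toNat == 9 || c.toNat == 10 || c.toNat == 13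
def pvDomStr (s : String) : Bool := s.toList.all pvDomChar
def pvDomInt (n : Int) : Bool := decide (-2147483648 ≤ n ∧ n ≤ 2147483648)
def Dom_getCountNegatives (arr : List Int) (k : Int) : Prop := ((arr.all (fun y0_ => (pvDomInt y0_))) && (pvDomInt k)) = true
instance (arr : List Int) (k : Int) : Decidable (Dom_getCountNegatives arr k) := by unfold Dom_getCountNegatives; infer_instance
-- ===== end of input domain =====

-- B replaces A's sliding-window running count by a prefix-count table with per-window differencing (alternative decomposition, same cost).


-- ===== PORT A =====
-- one loop step of A: bump count for arr[i], and when the window is full append count,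
-- drop arr[start]'s contribution and slide start
def stepA (arr : List Int) (k : Int) (s : List Int × Int × Int) (i : Int) : List Int × Int × Int :=
  let count := if PySem.List.pyGetD arr i 0 < 0 then s.2.2 + 1 else s.2.2
  if i - s.2.1 + 1 = k then
    (s.1 ++ [count], s.2.1 + 1, if PySem.List.pyGetD arr s.2.1 0 < 0 then count - 1 else count)
  else
    (s.1, s.2.1, count)

def getCountNegatives (arr : List Int) (k : Int) : List Int :=
  ((PySem.List.pyRange 0 (arr.length : Int) 1).foldl (stepA arr k) ([], 0, 0)).1

-- ===== PORT B =====
-- pre[0]=0, pre.append(pre[-1] + (1 if x < 0 else 0)) for x in arr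
def prefixNeg (arr : List Int) : List Int :=
  arr.foldl (fun pre x => pre ++ [PySem.List.pyGetD pre (-1) 0 + (if x < 0 then (1 : Int) else 0)]) [0]

def getCountNegatives_alt (arr : List Int) (k : Int) : List Int :=
  if k < 1 ∨ (arr.length : Int) < k then []
  else
    let pre := prefixNeg arr
    (PySem.List.pyRange 0 ((arr.length : Int) - k + 1) 1).map
      (fun s => PySem.List.pyGetD pre (s + k) 0 - PySem.List.pyGetD pre s 0)

-- ===== PRECONDITION & SPEC =====
def Spec_getCountNegatives (arr : List Int) (k : Int) (out : List Int) : Prop := out = getCountNegatives_alt arr k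
instance (arr : List Int) (k : Int) (out : List Int) : Decidable (Spec_getCountNegatives arr k out) := by unfold Spec_getCountNegatives; infer_instance

-- ===== CLAIM (what is proved, stated in full; the proofs are below) =====
def Claim_equal_getCountNegatives : Prop := ∀ (arr : List Int) (k : Int), Dom_getCountNegatives arr k → Spec_getCountNegatives arr k (getCountNegatives arr k)

-- ===== LEMMAS AND PROOFS =====

-- number of negatives among the first m elements
def cntNeg (arr : List Int) (m : Nat) : Int := ((arr.take m).countP (fun x => decide (x < 0)) : Nat)

def cntI (arr : List Int) (i : Int) : Int := cntNeg arr i.toNat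

lemma cntNeg_succ (arr : List Int) (m : Nat) (hm : m < arr.length) :
    cntNeg arr (m + 1) = cntNeg arr m + (if PySem.List.pyGetD arr (m : Int) 0 < 0 then 1 else 0) := by
  rw [PySem.List.pyGetD_natCast]
  unfold cntNeg
  rw [List.take_add_one, List.getElem?_eq_getElem hm, List.countP_append]
  have : arr.getD m 0 = arr[m] := List.getD_eq_getElem arr 0 hm
  rw [this]
  by_cases h : arr[m] < 0 <;> simp [h]

-- the prefix list B builds is a scanl
lemma prefix_foldl (arr : List Int) (acc : List Int) (c : Int) :
    arr.foldl (fun pre x => pre ++ [PySem.List.pyGetD pre (-1) 0 + (if x < 0 then (1 : Int) else 0)]) (acc ++ [c])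
      = acc ++ List.scanl (fun a x => a + (if x < 0 then (1 : Int) else 0)) c arr := by
  induction arr generalizing acc c with
  | nil => simp [List.scanl]
  | cons x t ih =>
    rw [List.foldl_cons, PySem.List.pyGetD_neg_one_append_singleton, List.scanl]
    have := ih (acc ++ [c]) (c + (if x < 0 then (1 : Int) else 0))
    simpa using this

lemma scanl_getD (arr : List Int) (c : Int) (j : Nat) (hj : j ≤ arr.length) :
    (List.scanl (fun a x => a + (if x < 0 then (1 : Int) else 0)) c arr).getD j 0 = c + cntNeg arr j := by
  induction arr generalizing c j with
  | nil =>
    have : j = 0 := by simpa using hj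
    subst this
    simp [List.scanl, cntNeg]
  | cons x t ih =>
    rw [List.scanl_cons]
    cases j with
    | zero => simp [cntNeg]
    | succ j =>
      rw [List.getD_cons_succ, ih _ j (by simpa using hj)]
      unfold cntNeg
      rw [List.take_succ_cons, List.countP_cons]
      by_cases h : x < 0
      · simp [h]
        ring
      · simp [h]

lemma prefixNeg_getD (arr : List Int) (j : Int) (h0 : 0 ≤ j) (hj : j ≤ (arr.length : Int)) :
    PySem.List.pyGetD (prefixNeg arr) j 0 = cntI arr j := by
  have hpre : prefixNeg arr = List.scanl (fun a x => a + (if x < 0 then (1 : Int) else 0)) 0 arr := by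
    have := prefix_foldl arr [] 0
    simpa [prefixNeg] using this
  obtain ⟨n, rfl⟩ : ∃ n : Nat, j = (n : Int) := ⟨j.toNat, (Int.toNat_of_nonneg h0).symm⟩
  rw [PySem.List.pyGetD_natCast, hpre, scanl_getD arr 0 n (by exact_mod_cast hj)]
  simp [cntI]

-- the sliding-window invariant of A's loop, k ≥ 1
lemma invA (arr : List Int) (k : Int) (hk : 1 ≤ k) (m : Nat) (hm : m ≤ arr.length) :
    (PySem.List.pyRange 0 (m : Int) 1).foldl (stepA arr k) ([], 0, 0)
      = ((PySem.List.pyRange 0 ((m : Int) - k + 1) 1).map (fun s => cntI arr (s + k) - cntI arr s),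
         max 0 ((m : Int) - k + 1),
         cntNeg arr m - cntI arr (max 0 ((m : Int) - k + 1))) := by
  induction m with
  | zero =>
    have hmax : max 0 (((0 : Nat) : Int) - k + 1) = 0 := by omega
    rw [PySem.List.pyRange_one_eq_nil (by omega : ((0 : Nat) : Int) ≤ 0),
        PySem.List.pyRange_one_eq_nil (by omega : ((0 : Nat) : Int) - k + 1 ≤ 0), hmax]
    simp [cntNeg, cntI]
  | succ m ih =>
    have hm' : m ≤ arr.length := Nat.le_of_succ_le hm
    have hlt : m < arr.length := hm
    have hcast : ((m + 1 : Nat) : Int) = (m : Int) + 1 := by push_cast; ring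
    rw [hcast, PySem.List.pyRange_one_succ_right (by positivity), List.foldl_append, ih hm']
    simp only [List.foldl_cons, List.foldl_nil]
    unfold stepA
    dsimp only
    have hstep1 := cntNeg_succ arr m hlt
    by_cases hcond : k ≤ (m : Int) + 1
    · -- window complete at index m
      have hmax : max 0 ((m : Int) - k + 1) = (m : Int) - k + 1 := by omega
      have hE : (m : Int) + 1 - k + 1 = ((m : Int) - k + 1) + 1 := by ring
      set j : Nat := ((m : Int) - k + 1).toNat with hjdef
      have hj : ((j : Nat) : Int) = (m : Int) - k + 1 := by rw [hjdef]; omega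
      have hjlt : j < arr.length := by omega
      have hI1 : cntI arr ((m : Int) - k + 1) = cntNeg arr j := by unfold cntI; rw [hjdef]
      have hI2 : cntI arr ((m : Int) - k + 1 + 1) = cntNeg arr (j + 1) := by
        unfold cntI; congr 1; omega
      have hIm : cntI arr ((m : Int) - k + 1 + k) = cntNeg arr (m + 1) := by
        unfold cntI; congr 1; omega
      have hmax' : max 0 ((m : Int) - k + 1 + 1) = ((m : Int) - k + 1) + 1 := by omega
      have hstep2 := cntNeg_succ arr j hjlt
      rw [hj] at hstep2
      rw [hmax, if_pos (by ring : (m : Int) - ((m : Int) - k + 1) + 1 = k), hE, hmax',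
          PySem.List.pyRange_one_succ_right (by omega : (0 : Int) ≤ (m : Int) - k + 1),
          List.map_append, List.map_singleton, hI2, hI1, hIm]
      refine Prod.ext ?_ (Prod.ext rfl ?_)
      · dsimp only
        congr 2
        split_ifs at hstep1 ⊢ <;> omega
      · dsimp only
        split_ifs at hstep1 hstep2 ⊢ <;> omega
    · -- window not yet complete
      have hmax : max 0 ((m : Int) - k + 1) = 0 := by omega
      have hmax' : max 0 ((m : Int) + 1 - k + 1) = 0 := by omega
      have hI0 : cntI arr 0 = 0 := by simp [cntI, cntNeg]
      rw [hmax, hmax', if_neg (by omega : ¬ (m : Int) - 0 + 1 = k)]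
      rw [PySem.List.pyRange_one_eq_nil (by omega : (m : Int) - k + 1 ≤ 0),
          PySem.List.pyRange_one_eq_nil (by omega : (m : Int) + 1 - k + 1 ≤ 0)]
      refine Prod.ext (by simp) (Prod.ext rfl ?_)
      dsimp only
      rw [hI0]
      split_ifs at hstep1 ⊢ <;> omega

-- for k ≤ 0 the window condition never fires
lemma invA_nonpos (arr : List Int) (k : Int) (hk : k ≤ 0) (m : Nat) (hm : m ≤ arr.length) :
    (PySem.List.pyRange 0 (m : Int) 1).foldl (stepA arr k) ([], 0, 0) = ([], 0, cntNeg arr m) := by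
  induction m with
  | zero =>
    rw [show ((0 : Nat) : Int) = 0 from rfl, PySem.List.pyRange_one_eq_nil (le_refl 0)]
    simp [cntNeg]
  | succ m ih =>
    have hm' : m ≤ arr.length := Nat.le_of_succ_le hm
    have hlt : m < arr.length := hm
    have hcast : ((m + 1 : Nat) : Int) = (m : Int) + 1 := by push_cast; ring
    rw [hcast, PySem.List.pyRange_one_succ_right (by positivity), List.foldl_append, ih hm']
    simp only [List.foldl_cons, List.foldl_nil]
    unfold stepA
    dsimp only
    rw [if_neg (by omega : ¬ (m : Int) - 0 + 1 = k)]
    have hstep1 := cntNeg_succ arr m hlt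
    refine Prod.ext (by simp) (Prod.ext (by simp) ?_)
    dsimp only
    split_ifs at hstep1 ⊢ <;> omega

-- ===== VERDICT (by name: the statement is the Claim_ definition above) =====
theorem getCountNegatives_spec : Claim_equal_getCountNegatives := by
  intro arr k _
  unfold Spec_getCountNegatives getCountNegatives getCountNegatives_alt
  by_cases hk : k < 1
  · rw [invA_nonpos arr k (by omega) arr.length le_rfl]
    simp [hk]
  · rw [invA arr k (by omega) arr.length le_rfl]
    by_cases hlen : (arr.length : Int) < k
    · rw [if_pos (Or.inr hlen), PySem.List.pyRange_one_eq_nil (by omega)]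
      simp
    · rw [if_neg (by omega : ¬(k < 1 ∨ (arr.length : Int) < k))]
      refine List.map_congr_left ?_
      intro s hs
      rw [PySem.List.mem_pyRange_one] at hs
      rw [prefixNeg_getD arr (s + k) (by omega) (by omega),
          prefixNeg_getD arr s (by omega) (by omega)]
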